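-- pv_equiv track=rewrite | github.com/4um3n/SoftUni-Courses | Python/Fundamentals/0.4-Functions/Exercises/list_manipulator.py | min_n
-- ===== SOURCE A (Python) =====
-- def min_n(data: list, int_type: str):
--     if int_type == "even":
--         nums = [i for i in data if i % 2 == 0]
--     elif int_type == "odd":
--         nums = [i for i in data if i % 2 == 1]
--
--     if len(nums) == 0:
--         return None
--
--     n = min(nums)
--     ind = 0
--     for i in range(len(data)):
--         if data[i] == n:
--             ind = i
--     return ind
-- ===== SOURCE B (Python) =====
-- def min_n(data: list, int_type: str):
--     if int_type == "even":
--         parity = 0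
--     elif int_type == "odd":
--         parity = 1
--     best_val = None
--     best_idx = None
--     for idx, v in enumerate(data):
--         if v % 2 == parity and (best_val is None or v <= best_val):
--             best_val, best_idx = v, idx
--     return best_idx
-- ===== Notes on version B (the rewrite author's own statement) =====
-- stated objective: alternative
-- what changed: Replaces A's three passes (parity filter, min of the filtered list, full index scan for the last occurrence) by a single fused enumerate pass that keeps the best value and, via <=, the last index where it occurs.
import Mathlib
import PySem

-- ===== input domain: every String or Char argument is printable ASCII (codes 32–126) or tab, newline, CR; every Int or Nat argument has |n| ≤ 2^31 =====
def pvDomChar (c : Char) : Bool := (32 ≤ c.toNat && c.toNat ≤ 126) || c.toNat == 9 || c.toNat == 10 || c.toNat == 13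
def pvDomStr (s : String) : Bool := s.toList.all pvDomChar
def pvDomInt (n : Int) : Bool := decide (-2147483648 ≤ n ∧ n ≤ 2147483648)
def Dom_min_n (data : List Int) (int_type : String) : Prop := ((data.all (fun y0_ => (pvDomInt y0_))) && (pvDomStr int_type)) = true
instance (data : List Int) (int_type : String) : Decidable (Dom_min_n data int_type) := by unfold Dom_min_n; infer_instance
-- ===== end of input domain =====

-- B fuses A's filter + min + last-index scan into one enumerate pass (alternative decomposition, same O(n) cost).

-- ===== PORT A =====
def min_n (data : List Int) (int_type : String) : Option Int :=
  let nums? : Option (List Int) :=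
    if int_type == "even" then some (data.filter (fun i => PySem.Int.mod i 2 == 0))
    else if int_type == "odd" then some (data.filter (fun i => PySem.Int.mod i 2 == 1))
    else none                  -- 'nums' unbound: Python raises UnboundLocalError (outside Pre_)
  match nums? with
  | none => none
  | some nums =>
    if nums.length = 0 then none
    else
      match PySem.List.min? nums (fun x => x) with
      | none => none           -- unreachable: nums ≠ []
      | some n =>
        some ((PySem.List.pyRange 0 (data.length : Int) 1).foldl
          (fun ind i => if PySem.List.pyGetD data i 0 == n then i else ind) 0)

-- ===== PORT B =====
def pvStep (parity : Int) (st : Option Int × Option Int) (p : Int × Int) : Option Int × Option Int :=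
  if PySem.Int.mod p.2 2 == parity && (match st.1 with | none => true | some b => decide (p.2 ≤ b))
  then (some p.2, some p.1) else st

def pvRun (parity : Int) (data : List Int) : Option Int :=
  ((PySem.List.enumerate data 0).foldl (pvStep parity) (none, none)).2

def min_n_alt (data : List Int) (int_type : String) : Option Int :=
  if int_type == "even" then pvRun 0 data
  else if int_type == "odd" then pvRun 1 data
  else if data.isEmpty then none   -- loop body never runs, best_idx stays None
  else none                        -- Python raises UnboundLocalError here too (outside Pre_)

-- ===== PRECONDITION & SPEC =====
-- Pre_ excludes exactly the invalid int_type strings, on which Python A raises UnboundLocalError.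
def Pre_min_n (data : List Int) (int_type : String) : Prop :=
  int_type = "even" ∨ int_type = "odd"
instance (data : List Int) (int_type : String) : Decidable (Pre_min_n data int_type) := by
  unfold Pre_min_n; infer_instance

def pvWitness_min_n : List Int × String := ([3, 2, 8, 2], "even")

def Spec_min_n (data : List Int) (int_type : String) (out : Option Int) : Prop := out = min_n_alt data int_type
instance (data : List Int) (int_type : String) (out : Option Int) : Decidable (Spec_min_n data int_type out) := by unfold Spec_min_n; infer_instance

-- ===== CLAIM (what is proved, stated in full; the proofs are below) =====
def Claim_equal_min_n : Prop := ∀ (data : List Int) (int_type : String), Dom_min_n data int_type → Pre_min_n data int_type → Spec_min_n data int_type (min_n data int_type)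

-- ===== LEMMAS AND PROOFS =====

-- A's index loop, rephrased over enumerate: the last index whose value equals n (0 if none).
def pvLastIdx (n : Int) (data : List Int) : Int :=
  (PySem.List.enumerate data 0).foldl (fun ind p => if p.2 == n then p.1 else ind) 0

theorem pvLastIdx_eq_loop (n : Int) (data : List Int) :
    (PySem.List.pyRange 0 (data.length : Int) 1).foldl
      (fun ind i => if PySem.List.pyGetD data i 0 == n then i else ind) 0 = pvLastIdx n data := by
  unfold pvLastIdx
  rw [PySem.List.enumerate_eq_map_pyRange data 0, List.foldl_map]
  simp [PySem.List.len_eq]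

theorem pvLastIdx_append (n x : Int) (data : List Int) :
    pvLastIdx n (data ++ [x]) =
      if x = n then (data.length : Int) else pvLastIdx n data := by
  unfold pvLastIdx
  rw [PySem.List.enumerate_append, List.foldl_append]
  simp [PySem.List.enumerate_cons]

-- core invariant of B's fused pass
theorem pvRun_core (p : Int) (data : List Int) :
    (PySem.List.enumerate data 0).foldl (pvStep p) (none, none) =
      match data.filter (fun i => PySem.Int.mod i 2 == p) with
      | [] => (none, none)
      | y :: t => (some (t.foldl min y), some (pvLastIdx (t.foldl min y) data)) := by
  have hm : ∀ a : Int, PySem.Int.mod a 2 = a % 2 := fun a => PySem.Int.mod_eq_emod_of_pos (by omega)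
  induction data using List.reverseRecOn with
  | nil => simp [PySem.List.enumerate_nil]
  | append_singleton xs x ih =>
    rw [PySem.List.enumerate_append, List.foldl_append, ih]
    simp only [PySem.List.enumerate_cons, PySem.List.enumerate_nil, List.foldl_cons,
      List.foldl_nil, List.filter_append, List.filter_cons, List.filter_nil]
    by_cases hx : x % 2 = p
    · have hxb : (PySem.Int.mod x 2 == p) = true := by simp [hx]
      cases hf : xs.filter (fun i => PySem.Int.mod i 2 == p) with
      | nil => simp [pvStep, hx, pvLastIdx_append]
      | cons y t =>
        by_cases hle : x ≤ t.foldl min y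
        · simp [pvStep, hx, hle, pvLastIdx_append]
        · have hlt : t.foldl min y < x := lt_of_not_ge hle
          have hne : x ≠ t.foldl min y := ne_of_gt hlt
          simp [pvStep, hx, hle, min_eq_left (le_of_lt hlt), pvLastIdx_append, hne]
    · -- x has the wrong parity: state and filter unchanged; x cannot equal the running min
      have hxb : (PySem.Int.mod x 2 == p) = false := by simp [hx]
      cases hf : xs.filter (fun i => PySem.Int.mod i 2 == p) with
      | nil => simp [pvStep, hx]
      | cons y t =>
        have hmem : t.foldl min y ∈ y :: t :=
          PySem.List.min?_mem (xs := y :: t) (key := fun z => z)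
            (m := t.foldl min y) (by rw [PySem.List.min?_id_cons])
        have hpar : (PySem.Int.mod (t.foldl min y) 2 == p) = true := by
          have hmem' : t.foldl min y ∈ xs.filter (fun i => PySem.Int.mod i 2 == p) := hf ▸ hmem
          exact (List.mem_filter.mp hmem').2
        have hne : x ≠ t.foldl min y := by
          intro h; apply hx
          have := hpar; rw [← h] at this; simpa [hm] using this
        simp [pvStep, hx, pvLastIdx_append, hne]

-- the two sides agree for a fixed valid parity (LHS is definitionally A's body for that branch)
theorem pvAgree (p : Int) (data : List Int) :
    (if (data.filter (fun i => PySem.Int.mod i 2 == p)).length = 0 then none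
     else match PySem.List.min? (data.filter (fun i => PySem.Int.mod i 2 == p)) (fun x => x) with
          | none => (none : Option Int)
          | some n => some ((PySem.List.pyRange 0 (data.length : Int) 1).foldl
              (fun ind i => if PySem.List.pyGetD data i 0 == n then i else ind) 0)) = pvRun p data := by
  unfold pvRun
  rw [pvRun_core]
  cases hf : data.filter (fun i => PySem.Int.mod i 2 == p) with
  | nil => simp
  | cons y t =>
    rw [if_neg (by simp), PySem.List.min?_id_cons]
    exact congrArg some (pvLastIdx_eq_loop _ data)

-- ===== VERDICT (by name: the statement is the Claim_ definition above) =====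
theorem min_n_spec : Claim_equal_min_n := by
  intro data int_type _ hpre
  unfold Spec_min_n
  rcases hpre with h | h <;> subst h
  · rw [show min_n data "even" = pvRun 0 data from pvAgree 0 data]; rfl
  · rw [show min_n data "odd" = pvRun 1 data from pvAgree 1 data]; rfl
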